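-- pv_equiv track=rewrite | github.com/MarioCSilva/Algorithm-Problems | src/ex2.py | transform
-- ===== SOURCE A (Python) =====
-- def transform(phrase):
--     flag = False
--     final_phrase = ''
--     for char in phrase:
--         if char == '"':
--             if flag == False:
--                 flag = True
--                 final_phrase += '``'
--             else:
--                 flag = False
--                 final_phrase += "''"
--         else:
--             final_phrase += char
--     return final_phrase
-- ===== SOURCE B (Python) =====
-- def transform(phrase):
--     parts = phrase.split('"')
--     seps = ['``', "''"]
--     result = parts[0]
--     for i, seg in enumerate(parts[1:]):
--         result += seps[i % 2] + seg
--     return result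
-- ===== Notes on version B (the rewrite author's own statement) =====
-- stated objective: idiomatic
-- what changed: B splits the phrase at every double-quote and rejoins the segments with the two alternating LaTeX separators chosen by gap-index parity, eliminating A's per-character loop with a toggle flag and quadratic string concatenation.
import Mathlib
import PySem

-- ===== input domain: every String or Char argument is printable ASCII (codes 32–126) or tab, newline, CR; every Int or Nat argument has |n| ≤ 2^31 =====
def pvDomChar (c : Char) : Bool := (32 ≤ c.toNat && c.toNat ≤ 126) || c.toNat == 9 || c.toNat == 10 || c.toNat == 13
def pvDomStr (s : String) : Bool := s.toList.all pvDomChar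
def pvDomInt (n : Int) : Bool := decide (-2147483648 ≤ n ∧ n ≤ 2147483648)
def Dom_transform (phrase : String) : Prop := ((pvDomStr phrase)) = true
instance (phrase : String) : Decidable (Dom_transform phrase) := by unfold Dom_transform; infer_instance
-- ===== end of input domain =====

-- B replaces A's per-character loop with a toggle flag by split-at-quote and
-- rejoin with alternating separators (objective: idiomatic decomposition).

-- ===== PORT A =====
-- A: one pass over the characters with a Bool flag and a growing accumulator.
def transform (phrase : String) : String :=
  let r := phrase.toList.foldl
    (fun (st : Bool × List Char) char =>
      if char = '"' then
        if st.1 = false then (true, st.2 ++ ['`', '`'])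
        else (false, st.2 ++ ['\'', '\''])
      else (st.1, st.2 ++ [char]))
    (false, [])
  String.ofList r.2

-- ===== PORT B =====
-- B-side helper: phrase.split('"') on the character list (always nonempty result).
def splitQuote : List Char → List (List Char)
  | [] => [[]]
  | c :: cs =>
    match splitQuote cs with
    | [] => []
    | p :: ps => if c = '"' then [] :: p :: ps else (c :: p) :: ps

-- B-side helper: the loop "for i, seg in enumerate(parts[1:]): result += seps[i%2] + seg".
def glueRest : Nat → List (List Char) → List Char
  | _, [] => []
  | i, seg :: rest => (if i % 2 = 0 then ['`', '`'] else ['\'', '\'']) ++ seg ++ glueRest (i + 1) rest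

def transform_alt (phrase : String) : String :=
  match splitQuote phrase.toList with
  | [] => ""
  | p :: ps => String.ofList (p ++ glueRest 0 ps)

-- ===== PRECONDITION & SPEC =====
def Spec_transform (phrase : String) (out : String) : Prop := out = transform_alt phrase
instance (phrase : String) (out : String) : Decidable (Spec_transform phrase out) := by unfold Spec_transform; infer_instance

-- ===== CLAIM (what is proved, stated in full; the proofs are below) =====
def Claim_equal_transform : Prop := ∀ (phrase : String), Dom_transform phrase → Spec_transform phrase (transform phrase)

-- ===== LEMMAS AND PROOFS =====

-- Recursive (non-accumulator) form of A's loop, used only in the proof.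
def recA : Bool → List Char → List Char
  | _, [] => []
  | flag, c :: cs =>
    if c = '"' then
      (if flag = false then ['`', '`'] ++ recA true cs else ['\'', '\''] ++ recA false cs)
    else c :: recA flag cs

theorem foldl_recA (cs : List Char) : ∀ (flag : Bool) (acc : List Char),
    (cs.foldl
      (fun (st : Bool × List Char) char =>
        if char = '"' then
          if st.1 = false then (true, st.2 ++ ['`', '`'])
          else (false, st.2 ++ ['\'', '\''])
        else (st.1, st.2 ++ [char]))
      (flag, acc)).2 = acc ++ recA flag cs := by
  induction cs with
  | nil => intro flag acc; simp [recA]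
  | cons c cs ih =>
    intro flag acc
    by_cases hc : c = '"'
    · cases flag <;> simp [hc, recA, ih, List.append_assoc]
    · simp [List.foldl_cons, hc, recA, ih]

theorem splitQuote_ne_nil (cs : List Char) : splitQuote cs ≠ [] := by
  induction cs with
  | nil => simp [splitQuote]
  | cons c cs ih =>
    unfold splitQuote
    cases h : splitQuote cs with
    | nil => exact absurd h ih
    | cons p ps => simp; split <;> simp

theorem recA_glue (cs : List Char) : ∀ (flag : Bool) (i : Nat), (flag = true ↔ i % 2 = 1) →
    recA flag cs = (match splitQuote cs with
                    | [] => []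
                    | p :: ps => p ++ glueRest i ps) := by
  induction cs with
  | nil => intro flag i _; simp [recA, splitQuote, glueRest]
  | cons c cs ih =>
    intro flag i hpar
    cases h : splitQuote cs with
    | nil => exact absurd h (splitQuote_ne_nil cs)
    | cons p ps =>
      by_cases hc : c = '"'
      · have hpar' : (!flag) = true ↔ (i + 1) % 2 = 1 := by
          cases flag <;> simp_all <;> omega
        have := ih (!flag) (i + 1) hpar'
        rw [h] at this
        simp only at this
        cases flag with
        | false =>
          have hi : i % 2 = 0 := by
            rcases Nat.mod_two_eq_zero_or_one i with h0 | h1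
            · exact h0
            · simp [h1] at hpar
          simp only [Bool.not_false] at this
          simp [recA, splitQuote, h, hc, glueRest, hi, this]
        | true =>
          have hi : i % 2 = 1 := hpar.mp rfl
          simp only [Bool.not_true] at this
          simp [recA, splitQuote, h, hc, glueRest, hi, this]
      · have := ih flag i hpar
        rw [h] at this
        simp only at this
        simp [recA, splitQuote, h, hc, this]

-- ===== VERDICT (by name: the statement is the Claim_ definition above) =====
theorem transform_spec : Claim_equal_transform := by
  intro phrase _
  unfold Spec_transform transform transform_alt
  have hpar : (false : Bool) = true ↔ 0 % 2 = 1 := by simp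
  have h := recA_glue phrase.toList false 0 hpar
  cases hs : splitQuote phrase.toList with
  | nil => exact absurd hs (splitQuote_ne_nil phrase.toList)
  | cons p ps =>
    rw [hs] at h
    simp [foldl_recA, h]
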